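-- pv_equiv track=rewrite | github.com/AniNotes/aninotes-project | AniNotes-repo/AninotesLibs/FlatCVLib/src/FlatCV_aninotes/database_construction.py | remove_near_subset_elements
-- ===== SOURCE A (Python) =====
-- def is_near_subset(A, B, closeness_bound): # A is near subset of B
--     if len(A) > len(B):
--         return False
--     else:
--         is_near_subset = True
--         for A_point in A:
--             is_near_in_B = False
--             for B_point in B:
--                 A_y, A_x = A_point
--                 B_y, B_x = B_point
--                 if A_point == B_point or (abs(A_y - B_y) <= closeness_bound and abs(A_x - B_x) <= closeness_bound):
--                     is_near_in_B = True
--                     break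
--             if not(is_near_in_B):
--                 is_near_subset = False
--                 break
--         return is_near_subset
--
-- def remove_near_subset_elements(lst, closeness_bound):
--     new_list = []
--     for item in lst:
--         if item not in new_list:
--             new_list.append(item)
--     lst = new_list
--     final_list = []
--     list_copy = lst.copy()
--     for element in lst:
--         other_elements = []
--         for other_element in list_copy:
--             if other_element != element:
--                 for point in other_element[1]:
--                     if point not in other_elements:
--                         other_elements.append(point)
--         if not is_near_subset(element[1], other_elements, closeness_bound):
--             final_list.append(element)
--         else: # MAYBE REMOVE? IDK... IF ISSUES --> CONSIDER
--             list_copy.remove(element)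
--     return final_list
--     '''lst = [item for i, item in enumerate(lst) if item not in lst[:i]]
--     lst_copy = list[:]'''
-- ===== SOURCE B (Python) =====
-- def remove_near_subset_elements(lst, closeness_bound):
--     # Deduplicate (first occurrences) using a hashable key set instead of list scans.
--     uniq, seen = [], set()
--     for item in lst:
--         key = (item[0], tuple(item[1]))
--         if key not in seen:
--             seen.add(key)
--             uniq.append(item)
--     # cnt[q] = number of remaining elements whose point list contains q
--     cnt = {}
--     for _, pts in uniq:
--         for p in set(pts):
--             cnt[p] = cnt.get(p, 0) + 1
--
--     def near(p, q):
--         return p == q or (abs(p[0] - q[0]) <= closeness_bound and abs(p[1] - q[1]) <= closeness_bound)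
--
--     result = []
--     for element in uniq:
--         own = set(element[1])
--         # distinct points belonging to some *other* remaining element
--         others = [q for q, c in cnt.items() if c - (1 if q in own else 0) > 0]
--         covered = len(element[1]) <= len(others) and all(
--             any(near(p, q) for q in others) for p in element[1])
--         if covered:
--             for p in own:          # element removed: retract its contribution
--                 cnt[p] -= 1
--         else:
--             result.append(element)
--     return result
-- ===== Notes on version B (the rewrite author's own statement) =====
-- stated objective: faster
-- what changed: A rebuilds, for every element, a deduplicated list of all other elements' points with nested list-membership scans; B builds one point-to-count dictionary over the deduplicated elements once and maintains it incrementally as covered elements are removed, reading the distinct other-points directly off the dictionary.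
import Mathlib
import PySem

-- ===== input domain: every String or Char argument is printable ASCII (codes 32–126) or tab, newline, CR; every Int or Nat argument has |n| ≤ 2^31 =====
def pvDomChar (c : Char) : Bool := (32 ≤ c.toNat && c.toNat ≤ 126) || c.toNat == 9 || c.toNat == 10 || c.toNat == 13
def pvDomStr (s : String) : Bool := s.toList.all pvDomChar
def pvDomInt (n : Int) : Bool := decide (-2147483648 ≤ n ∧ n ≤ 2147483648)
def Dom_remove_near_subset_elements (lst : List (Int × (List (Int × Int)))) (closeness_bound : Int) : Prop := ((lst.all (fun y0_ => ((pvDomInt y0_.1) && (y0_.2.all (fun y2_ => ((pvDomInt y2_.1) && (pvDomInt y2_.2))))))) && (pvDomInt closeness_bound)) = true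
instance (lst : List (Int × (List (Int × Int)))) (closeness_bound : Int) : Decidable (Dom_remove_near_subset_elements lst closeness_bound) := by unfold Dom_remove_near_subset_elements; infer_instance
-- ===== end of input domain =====

-- B replaces A's per-element rebuild of the deduplicated "other points" list (nested list-membership
-- scans) by one point→count dictionary maintained incrementally as covered elements are removed; faster.

-- ===== PORT A =====
-- near test: A_point == B_point or (|Δy| <= bound and |Δx| <= bound)
def pvNearPt (bound : Int) (p q : Int × Int) : Bool :=
  decide (p = q) || (decide (|p.1 - q.1| ≤ bound) && decide (|p.2 - q.2| ≤ bound))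

-- inner 'for B_point in B: … break' loop of is_near_subset
def pvNearInB (bound : Int) (p : Int × Int) : List (Int × Int) → Bool
  | [] => false
  | q :: rest => if pvNearPt bound p q then true else pvNearInB bound p rest

-- outer 'for A_point in A: … break' loop of is_near_subset
def pvAllNear (bound : Int) (B : List (Int × Int)) : List (Int × Int) → Bool
  | [] => true
  | p :: rest => if pvNearInB bound p B then pvAllNear bound B rest else false

def pvIsNearSubset (A B : List (Int × Int)) (bound : Int) : Bool :=
  if A.length > B.length then false else pvAllNear bound B A

def remove_near_subset_elements (lst : List (Int × (List (Int × Int)))) (closeness_bound : Int) : List (Int × (List (Int × Int))) :=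
  -- new_list dedup loop
  let lst' := lst.foldl (fun acc item => if item ∈ acc then acc else acc ++ [item]) []
  -- main loop over lst with state (final_list, list_copy)
  (lst'.foldl (fun (st : List (Int × List (Int × Int)) × List (Int × List (Int × Int))) element =>
    let other_elements := st.2.foldl (fun acc other =>
      if other ≠ element then
        other.2.foldl (fun acc2 p => if p ∈ acc2 then acc2 else acc2 ++ [p]) acc
      else acc) []
    if !(pvIsNearSubset element.2 other_elements closeness_bound) then
      (st.1 ++ [element], st.2)
    else
      (st.1, st.2.erase element)) (([], lst'))).1

-- ===== PORT B =====
def pvNearPtB (bound : Int) (p q : Int × Int) : Bool :=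
  decide (p = q) || (decide (|p.1 - q.1| ≤ bound) && decide (|p.2 - q.2| ≤ bound))

def remove_near_subset_elements_alt (lst : List (Int × (List (Int × Int)))) (closeness_bound : Int) : List (Int × (List (Int × Int))) :=
  -- dedup via a 'seen' set of keys
  let uniq := (lst.foldl (fun (st : List (Int × List (Int × Int)) × PySem.Set (Int × List (Int × Int))) item =>
      if st.2.contains item then st else (st.1 ++ [item], st.2.add item)) ([], PySem.Set.empty)).1
  -- cnt[q] = number of remaining elements whose point list contains q
  let cnt := uniq.foldl (fun d e =>
      (PySem.Set.ofList e.2).foldl (fun d p => d.modify p 0 (· + 1)) d)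
    (PySem.Dict.empty : PySem.Dict (Int × Int) Int)
  (uniq.foldl (fun (st : List (Int × List (Int × Int)) × PySem.Dict (Int × Int) Int) element =>
    let own := PySem.Set.ofList element.2
    let others := (st.2.items.filter (fun qc => decide (0 < qc.2 - (if own.contains qc.1 then 1 else 0)))).map (·.1)
    let covered := decide (element.2.length ≤ others.length) &&
      element.2.all (fun p => others.any (fun q => pvNearPtB closeness_bound p q))
    if covered then
      (st.1, own.foldl (fun d p => d.modify p 0 (· - 1)) st.2)
    else
      (st.1 ++ [element], st.2)) ([], cnt)).1

-- ===== PRECONDITION & SPEC =====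
def Spec_remove_near_subset_elements (lst : List (Int × (List (Int × Int)))) (closeness_bound : Int) (out : List (Int × (List (Int × Int)))) : Prop := out = remove_near_subset_elements_alt lst closeness_bound
instance (lst : List (Int × (List (Int × Int)))) (closeness_bound : Int) (out : List (Int × (List (Int × Int)))) : Decidable (Spec_remove_near_subset_elements lst closeness_bound out) := by unfold Spec_remove_near_subset_elements; infer_instance

-- ===== CLAIM (what is proved, stated in full; the proofs are below) =====
def Claim_equal_remove_near_subset_elements : Prop := ∀ (lst : List (Int × (List (Int × Int)))) (closeness_bound : Int), Dom_remove_near_subset_elements lst closeness_bound → Spec_remove_near_subset_elements lst closeness_bound (remove_near_subset_elements lst closeness_bound)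

-- ===== LEMMAS AND PROOFS =====

-- A's "if x not in acc: acc.append(x)" fold is PySem.Set.update (stated at the two concrete types)
theorem pvFoldAdd (ps : List (Int × Int)) (acc : List (Int × Int)) :
    ps.foldl (fun a p => if p ∈ a then a else a ++ [p]) acc = PySem.Set.update acc ps := by
  induction ps generalizing acc with
  | nil => simp [PySem.Set.update]
  | cons p rest ih =>
    rw [List.foldl_cons, PySem.Set.update_cons, ih, PySem.Set.add_eq_ite]

theorem pvFoldAddT (ps : List (Int × List (Int × Int))) (acc : List (Int × List (Int × Int))) :
    ps.foldl (fun a p => if p ∈ a then a else a ++ [p]) acc = PySem.Set.update acc ps := by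
  induction ps generalizing acc with
  | nil => simp [PySem.Set.update]
  | cons p rest ih =>
    rw [List.foldl_cons, PySem.Set.update_cons, ih, PySem.Set.add_eq_ite]

theorem pvDedupA (l : List (Int × List (Int × Int))) :
    l.foldl (fun acc item => if item ∈ acc then acc else acc ++ [item]) [] = PySem.Set.ofList l := by
  rw [pvFoldAddT]
  exact PySem.Set.update_nil_left l

-- B's seen-set dedup produces the same list as A's dedup
theorem pvDedupB (l : List (Int × List (Int × Int))) :
    ∀ (u : List (Int × List (Int × Int))) (s : PySem.Set (Int × List (Int × Int))),
    (∀ x, x ∈ s ↔ x ∈ u) →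
    (l.foldl (fun st item => if st.2.contains item then st else (st.1 ++ [item], st.2.add item))
      (u, s)).1
    = l.foldl (fun acc item => if item ∈ acc then acc else acc ++ [item]) u := by
  induction l with
  | nil => intro u s _; rfl
  | cons i rest ih =>
    intro u s hinv
    rw [List.foldl_cons, List.foldl_cons]
    by_cases h : i ∈ u
    · have hc : s.contains i = true := (PySem.Set.contains_iff s i).mpr ((hinv i).mpr h)
      simp only [hc, if_true, if_pos h]
      exact ih u s hinv
    · have hc : s.contains i = false := by
        rw [Bool.eq_false_iff]
        intro hcc
        exact h ((hinv i).mp ((PySem.Set.contains_iff s i).mp hcc))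
      simp only [hc, Bool.false_eq_true, if_false, if_neg h]
      exact ih (u ++ [i]) (s.add i) (by
        intro x
        rw [PySem.Set.mem_add, hinv x, List.mem_append, List.mem_singleton])

theorem pvNearPtB_eq (b : Int) : pvNearPtB b = pvNearPt b := rfl

theorem pvNearInB_eq_any (b : Int) (p : Int × Int) (L : List (Int × Int)) :
    pvNearInB b p L = L.any (pvNearPt b p) := by
  induction L with
  | nil => rfl
  | cons q rest ih =>
    rw [pvNearInB, List.any_cons, ih]
    by_cases h : pvNearPt b p q = true <;> simp [h]

theorem pvAllNear_eq_all (b : Int) (B L : List (Int × Int)) :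
    pvAllNear b B L = L.all (fun p => pvNearInB b p B) := by
  induction L with
  | nil => rfl
  | cons p rest ih =>
    rw [pvAllNear, List.all_cons, ih]
    by_cases h : pvNearInB b p B = true <;> simp [h]

-- the named step functions the ports' folds are definitionally equal to
def pvStepA (bound : Int)
    (st : List (Int × List (Int × Int)) × List (Int × List (Int × Int)))
    (element : Int × List (Int × Int)) :
    List (Int × List (Int × Int)) × List (Int × List (Int × Int)) :=
  let other_elements := st.2.foldl (fun acc other =>
    if other ≠ element then
      other.2.foldl (fun acc2 p => if p ∈ acc2 then acc2 else acc2 ++ [p]) acc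
    else acc) []
  if !(pvIsNearSubset element.2 other_elements bound) then
    (st.1 ++ [element], st.2)
  else
    (st.1, st.2.erase element)

def pvStepB (bound : Int)
    (st : List (Int × List (Int × Int)) × PySem.Dict (Int × Int) Int)
    (element : Int × List (Int × Int)) :
    List (Int × List (Int × Int)) × PySem.Dict (Int × Int) Int :=
  let own := PySem.Set.ofList element.2
  let others := (st.2.items.filter
      (fun qc => decide (0 < qc.2 - (if own.contains qc.1 then 1 else 0)))).map (·.1)
  let covered := decide (element.2.length ≤ others.length) &&
    element.2.all (fun p => others.any (fun q => pvNearPtB bound p q))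
  if covered then
    (st.1, own.foldl (fun d p => d.modify p 0 (· - 1)) st.2)
  else
    (st.1 ++ [element], st.2)

-- membership in A's per-element "other points" accumulation
theorem pvAOthers_mem (element : Int × List (Int × Int)) (copy : List (Int × List (Int × Int))) :
    ∀ (acc : List (Int × Int)) (q : Int × Int),
    q ∈ copy.foldl (fun acc other =>
        if other ≠ element then PySem.Set.update acc other.2 else acc) acc ↔
      q ∈ acc ∨ ∃ o ∈ copy, o ≠ element ∧ q ∈ o.2 := by
  induction copy with
  | nil => intro acc q; simp
  | cons o rest ih =>
    intro acc q
    rw [List.foldl_cons]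
    by_cases h : o = element
    · simp only [h, ne_eq, not_true_eq_false, if_false, ih]
      constructor
      · rintro (hq | ⟨o', ho', hne, hm⟩)
        · exact Or.inl hq
        · exact Or.inr ⟨o', List.mem_cons_of_mem _ ho', hne, hm⟩
      · rintro (hq | ⟨o', ho', hne, hm⟩)
        · exact Or.inl hq
        · rcases List.mem_cons.mp ho' with rfl | ho'
          · exact absurd rfl hne
          · exact Or.inr ⟨o', ho', hne, hm⟩
    · simp only [ne_eq, h, not_false_eq_true, if_true, ih, PySem.Set.mem_update]
      constructor
      · rintro (⟨hq | hq⟩ | ⟨o', ho', hne, hm⟩)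
        · exact Or.inl hq
        · exact Or.inr ⟨o, List.mem_cons_self, h, hq⟩
        · exact Or.inr ⟨o', List.mem_cons_of_mem _ ho', hne, hm⟩
      · rintro (hq | ⟨o', ho', hne, hm⟩)
        · exact Or.inl (Or.inl hq)
        · rcases List.mem_cons.mp ho' with rfl | ho'
          · exact Or.inl (Or.inr hm)
          · exact Or.inr ⟨o', ho', hne, hm⟩

theorem pvAOthers_nodup (element : Int × List (Int × Int)) (copy : List (Int × List (Int × Int))) :
    ∀ (acc : List (Int × Int)), acc.Nodup →
    (copy.foldl (fun acc other =>
        if other ≠ element then PySem.Set.update acc other.2 else acc) acc).Nodup := by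
  induction copy with
  | nil => intro acc h; simpa using h
  | cons o rest ih =>
    intro acc h
    rw [List.foldl_cons]
    by_cases ho : o = element
    · simp only [ho, ne_eq, not_true_eq_false, if_false]
      exact ih acc h
    · simp only [ne_eq, ho, not_false_eq_true, if_true]
      exact ih _ (PySem.Set.nodup_update acc o.2 h)

-- decrement fold on the dictionary
theorem pvGetDSub (l : List (Int × Int)) :
    ∀ (d : PySem.Dict (Int × Int) Int) (q : Int × Int),
    (l.foldl (fun d x => d.modify x 0 (· - 1)) d).getD q 0 = d.getD q 0 - l.count q := by
  induction l with
  | nil => intro d q; simp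
  | cons x rest ih =>
    intro d q
    rw [List.foldl_cons, ih, PySem.Dict.getD_modify, List.count_cons]
    by_cases h : q = x
    · simp [h]; ring
    · have : (x == q) = false := by simp [beq_eq_false_iff_ne]; exact fun hx => h hx.symm
      simp [h, this]

theorem pvKeysSubNodup (l : List (Int × Int)) (d : PySem.Dict (Int × Int) Int)
    (h : d.keys.Nodup) :
    (l.foldl (fun d x => d.modify x 0 (· - 1)) d).keys.Nodup := by
  rw [PySem.Dict.keys_foldl_modify l 0 (fun _ _ v => v - 1) d]
  exact PySem.Set.nodup_update d.keys l h

-- counter construction over the deduplicated elements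
theorem pvCntBuild (us : List (Int × List (Int × Int))) :
    ∀ (d : PySem.Dict (Int × Int) Int) (q : Int × Int),
    (us.foldl (fun d e => (PySem.Set.ofList e.2).foldl (fun d p => d.modify p 0 (· + 1)) d) d).getD q 0
      = d.getD q 0 + (us.countP (fun e => decide (q ∈ e.2)) : Int) := by
  induction us with
  | nil => intro d q; simp
  | cons e rest ih =>
    intro d q
    rw [List.foldl_cons, ih, PySem.Dict.getD_foldl_modify_add_one, List.countP_cons]
    by_cases h : q ∈ e.2
    · have hc : (PySem.Set.ofList e.2).count q = 1 :=
        List.count_eq_one_of_mem (PySem.Set.nodup_ofList e.2) ((PySem.Set.mem_ofList e.2 q).mpr h)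
      simp [h]; ring
    · have hc : (PySem.Set.ofList e.2).count q = 0 :=
        List.count_eq_zero.mpr (fun hm => h ((PySem.Set.mem_ofList e.2 q).mp hm))
      simp [hc, h]

theorem pvCntBuildNodup (us : List (Int × List (Int × Int))) :
    ∀ (d : PySem.Dict (Int × Int) Int), d.keys.Nodup →
    (us.foldl (fun d e => (PySem.Set.ofList e.2).foldl (fun d p => d.modify p 0 (· + 1)) d) d).keys.Nodup := by
  induction us with
  | nil => intro d h; exact h
  | cons e rest ih =>
    intro d h
    rw [List.foldl_cons]
    refine ih _ ?_
    rw [PySem.Dict.keys_foldl_modify (PySem.Set.ofList e.2) 0 (fun _ _ v => v + 1) d]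
    exact PySem.Set.nodup_update d.keys _ h

-- B's "others" list, rewritten over the keys
theorem pvBOthers_eq (cnt : PySem.Dict (Int × Int) Int) (hnd : cnt.keys.Nodup)
    (own : PySem.Set (Int × Int)) :
    (cnt.items.filter (fun qc => decide (0 < qc.2 - (if own.contains qc.1 then 1 else 0)))).map (·.1)
    = cnt.keys.filter (fun q => decide (0 < cnt.getD q 0 - (if own.contains q then 1 else 0))) := by
  rw [PySem.Dict.items_eq_map_keys cnt hnd 0, List.filter_map, List.map_map]
  simp [Function.comp_def]

theorem pvCountErase (copy : List (Int × List (Int × Int))) (e : Int × List (Int × Int))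
    (he : e ∈ copy) (_hnd : copy.Nodup) (P : (Int × List (Int × Int)) → Bool) :
    (copy.countP P : Int) = ((copy.erase e).countP P : Int) + (if P e then 1 else 0) := by
  have hperm := List.perm_cons_erase he
  rw [hperm.countP_eq P, List.countP_cons]
  push_cast
  by_cases h : P e = true <;> simp [h]

-- one step of the two main loops agrees, and the invariants are preserved
theorem pvMain (bound : Int) :
    ∀ (rest copy : List (Int × List (Int × Int))) (cnt : PySem.Dict (Int × Int) Int)
      (final : List (Int × List (Int × Int))),
    copy.Nodup → (∀ e ∈ rest, e ∈ copy) → rest.Nodup → cnt.keys.Nodup →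
    (∀ q, cnt.getD q 0 = (copy.countP (fun o => decide (q ∈ o.2)) : Int)) →
    (rest.foldl (pvStepA bound) (final, copy)).1 = (rest.foldl (pvStepB bound) (final, cnt)).1 := by
  intro rest
  induction rest with
  | nil => intro copy cnt final _ _ _ _ _; rfl
  | cons r rest ih =>
    intro copy cnt final hndc hsub hndr hk hinv
    obtain ⟨hrnotin, hndrest⟩ := List.nodup_cons.mp hndr
    have hrcopy : r ∈ copy := hsub r List.mem_cons_self
    rw [List.foldl_cons, List.foldl_cons]
    simp only [pvStepA, pvStepB, pvFoldAdd]
    rw [pvBOthers_eq cnt hk (PySem.Set.ofList r.2)]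
    have hcontains : ∀ q : Int × Int,
        ((if (PySem.Set.ofList r.2).contains q then 1 else 0 : Int)
          = if q ∈ r.2 then 1 else 0) := by
      intro q
      by_cases h : q ∈ r.2
      · have : (PySem.Set.ofList r.2).contains q = true :=
          (PySem.Set.contains_iff _ q).mpr ((PySem.Set.mem_ofList r.2 q).mpr h)
        rw [if_pos this, if_pos h]
      · have : (PySem.Set.ofList r.2).contains q = false := by
          rw [Bool.eq_false_iff]
          intro hc
          exact h ((PySem.Set.mem_ofList r.2 q).mp ((PySem.Set.contains_iff _ q).mp hc))
        rw [this]
        simp [h]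
    have hsplit : ∀ q : Int × Int,
        (copy.countP (fun o => decide (q ∈ o.2)) : Int)
          = ((copy.erase r).countP (fun o => decide (q ∈ o.2)) : Int)
            + (if q ∈ r.2 then 1 else 0) := by
      intro q
      rw [pvCountErase copy r hrcopy hndc (fun o => decide (q ∈ o.2))]
      by_cases h : q ∈ r.2 <;> simp [h]
    set AO := copy.foldl
      (fun acc o => if o ≠ r then PySem.Set.update acc o.2 else acc) [] with hAO
    set BO := cnt.keys.filter
      (fun q => decide (0 < cnt.getD q 0
        - if (PySem.Set.ofList r.2).contains q then 1 else 0)) with hBO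
    have hmem : ∀ q, q ∈ AO ↔ q ∈ BO := by
      intro q
      rw [hAO, pvAOthers_mem r copy [] q, hBO, List.mem_filter]
      simp only [List.not_mem_nil, false_or, decide_eq_true_eq, hcontains q, hinv q, hsplit q]
      constructor
      · rintro ⟨o, ho, hne, hq⟩
        have hoe : o ∈ copy.erase r := (hndc.mem_erase_iff).mpr ⟨hne, ho⟩
        have hpos : 0 < (copy.erase r).countP (fun o => decide (q ∈ o.2)) :=
          List.countP_pos_iff.mpr ⟨o, hoe, by simpa using hq⟩
        have hkeys : q ∈ cnt.keys := by
          by_contra hnk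
          have hc0 : cnt.contains q = false := by
            rw [Bool.eq_false_iff]
            intro hc
            exact hnk ((PySem.Dict.contains_iff_mem_keys cnt q).mp hc)
          have hz := PySem.Dict.getD_of_not_contains cnt (0 : Int) hc0
          rw [hinv q, hsplit q] at hz
          have hposZ : (0:Int) < ((copy.erase r).countP (fun o => decide (q ∈ o.2)) : Int) := by
            exact_mod_cast hpos
          by_cases h : q ∈ r.2
          · rw [if_pos h] at hz; omega
          · rw [if_neg h] at hz; omega
        refine ⟨hkeys, ?_⟩
        have hposZ : (0:Int) < ((copy.erase r).countP (fun o => decide (q ∈ o.2)) : Int) := by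
          exact_mod_cast hpos
        by_cases h : q ∈ r.2
        · rw [if_pos h]; omega
        · rw [if_neg h]; omega
      · rintro ⟨hkeys, hpos⟩
        have hpos' : 0 < (copy.erase r).countP (fun o => decide (q ∈ o.2)) := by
          have hz : (0:Int) < ((copy.erase r).countP (fun o => decide (q ∈ o.2)) : Int) := by
            by_cases h : q ∈ r.2
            · rw [if_pos h] at hpos; omega
            · rw [if_neg h] at hpos; omega
          exact_mod_cast hz
        obtain ⟨o, hoe, hq⟩ := List.countP_pos_iff.mp hpos'
        obtain ⟨hne, ho⟩ := (hndc.mem_erase_iff).mp hoe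
        exact ⟨o, ho, hne, by simpa using hq⟩
    have hAOnd : AO.Nodup := pvAOthers_nodup r copy [] List.nodup_nil
    have hBOnd : BO.Nodup := hk.filter _
    have hperm : AO.Perm BO := (List.perm_ext_iff_of_nodup hAOnd hBOnd).mpr hmem
    have hcov : pvIsNearSubset r.2 AO bound
        = (decide (r.2.length ≤ BO.length)
            && r.2.all (fun p => BO.any (fun q => pvNearPtB bound p q))) := by
      have hfun : (fun p => pvNearInB bound p AO)
          = (fun p => BO.any (fun q => pvNearPtB bound p q)) := by
        funext p
        rw [pvNearInB_eq_any, pvNearPtB_eq]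
        exact hperm.any_eq
      rw [pvIsNearSubset, pvAllNear_eq_all, hfun, ← hperm.length_eq]
      by_cases hlt : r.2.length > AO.length
      · have hd : decide (r.2.length ≤ AO.length) = false := by
          simp only [decide_eq_false_iff_not]; omega
        simp [hlt, hd]
      · have hd : decide (r.2.length ≤ AO.length) = true := by
          simp only [decide_eq_true_eq]; omega
        simp [hlt, hd]
    rw [hcov]
    cases hc : (decide (r.2.length ≤ BO.length)
        && r.2.all (fun p => BO.any (fun q => pvNearPtB bound p q))) with
    | false =>
      simp only [Bool.not_false, if_true, Bool.false_eq_true, if_false]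
      exact ih copy cnt (final ++ [r]) hndc
        (fun e he => hsub e (List.mem_cons_of_mem _ he)) hndrest hk hinv
    | true =>
      simp only [Bool.not_true, Bool.false_eq_true, if_false, if_true]
      refine ih (copy.erase r) _ final (hndc.erase r) ?_ hndrest
        (pvKeysSubNodup _ cnt hk) ?_
      · intro e he
        exact (hndc.mem_erase_iff).mpr
          ⟨fun her => hrnotin (her ▸ he), hsub e (List.mem_cons_of_mem _ he)⟩
      · intro q
        rw [pvGetDSub, hinv q, hsplit q]
        by_cases h : q ∈ r.2
        · have hc1 : (PySem.Set.ofList r.2).count q = 1 :=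
            List.count_eq_one_of_mem (PySem.Set.nodup_ofList r.2)
              ((PySem.Set.mem_ofList r.2 q).mpr h)
          simp [h]
        · have hc0 : (PySem.Set.ofList r.2).count q = 0 :=
            List.count_eq_zero.mpr (fun hm => h ((PySem.Set.mem_ofList r.2 q).mp hm))
          simp [hc0, h]

-- ===== VERDICT (by name: the statement is the Claim_ definition above) =====

theorem remove_near_subset_elements_spec : Claim_equal_remove_near_subset_elements := by
  intro lst bound _
  unfold Spec_remove_near_subset_elements
  simp only [remove_near_subset_elements, remove_near_subset_elements_alt]
  rw [pvDedupB lst [] PySem.Set.empty (fun x => Iff.rfl), pvDedupA]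
  exact pvMain bound (PySem.Set.ofList lst) (PySem.Set.ofList lst) _ []
    (PySem.Set.nodup_ofList lst) (fun e he => he) (PySem.Set.nodup_ofList lst)
    (pvCntBuildNodup _ PySem.Dict.empty (by simp [PySem.Dict.keys_empty]))
    (fun q => by rw [pvCntBuild]; simp [PySem.Dict.getD_empty])
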